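-- pv_equiv track=rewrite | github.com/Colin-the/multiset | fixedContent.py | shared_k_minus_2_consecutive
-- ===== SOURCE A (Python) =====
-- from typing import List
-- from typing import List, Dict, Set
--
-- def shared_k_minus_2_consecutive(a: List[int], b: List[int], k: int) -> bool:
--     n = len(a)
--     if k - 2 <= 0:
--         return True
--
--     a_double = a + a
--     b_double = b + b
--     a_blocks = set()
--     b_blocks = set()
--
--     for start in range(n):
--         block_a = tuple(a_double[start:start + k - 2])
--         a_blocks.add(block_a)
--         block_b = tuple(b_double[start:start + k - 2])
--         b_blocks.add(block_b)
--
--     return not a_blocks.isdisjoint(b_blocks)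
-- ===== SOURCE B (Python) =====
-- def shared_k_minus_2_consecutive(a, b, k):
--     m = k - 2
--     if m <= 0:
--         return True
--     n = len(a)
--     ad = a + a
--     bd = b + b
--     xs = sorted([ad[i:i + m] for i in range(n)])
--     ys = sorted([bd[i:i + m] for i in range(n)])
--     i = j = 0
--     while i < n and j < n:
--         if xs[i] == ys[j]:
--             return True
--         if xs[i] < ys[j]:
--             i += 1
--         else:
--             j += 1
--     return False
-- ===== Notes on version B (the rewrite author's own statement) =====
-- stated objective: alternative
-- what changed: Replaces A's two hash-sets plus disjointness test by sorting both lists of circular (k-2)-blocks and scanning them with a two-pointer merge for a common element.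
import Mathlib
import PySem

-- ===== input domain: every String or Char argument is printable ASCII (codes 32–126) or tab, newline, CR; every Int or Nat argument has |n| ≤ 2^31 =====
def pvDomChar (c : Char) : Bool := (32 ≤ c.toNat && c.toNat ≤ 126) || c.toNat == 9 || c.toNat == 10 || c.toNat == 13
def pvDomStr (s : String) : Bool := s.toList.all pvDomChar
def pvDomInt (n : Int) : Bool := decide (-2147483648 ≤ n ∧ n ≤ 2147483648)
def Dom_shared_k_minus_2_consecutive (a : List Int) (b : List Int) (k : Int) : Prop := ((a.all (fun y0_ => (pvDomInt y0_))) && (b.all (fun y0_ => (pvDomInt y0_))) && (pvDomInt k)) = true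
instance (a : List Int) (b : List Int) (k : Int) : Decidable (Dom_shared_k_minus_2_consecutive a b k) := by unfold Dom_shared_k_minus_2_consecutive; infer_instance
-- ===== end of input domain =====

-- B replaces A's two hash sets + disjointness test by sorting both block lists and
-- scanning them with a two-pointer merge (objective: alternative algorithm, similar cost).

-- ===== PORT A =====
def shared_k_minus_2_consecutive (a : List Int) (b : List Int) (k : Int) : Bool :=
  let n : Int := a.length
  if k - 2 ≤ 0 then true
  else
    let aDouble := a ++ a
    let bDouble := b ++ b
    let p := (PySem.List.pyRange 0 n 1).foldl
      (fun (st : PySem.Set (List Int) × PySem.Set (List Int)) start =>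
        (PySem.Set.add st.1 (PySem.List.slice aDouble (some start) (some (start + (k - 2)))),
         PySem.Set.add st.2 (PySem.List.slice bDouble (some start) (some (start + (k - 2))))))
      (PySem.Set.empty, PySem.Set.empty)
    !(PySem.Set.isdisjoint p.1 p.2)

-- ===== PORT B =====
-- the 'while i < n and j < n' two-pointer loop of Source B, as recursion on the two suffixes
def pvMergeHas : List (List Int) → List (List Int) → Bool
  | x :: xs, y :: ys =>
      if x = y then true
      else if x < y then pvMergeHas xs (y :: ys)
      else pvMergeHas (x :: xs) ys
  | _, _ => false

def shared_k_minus_2_consecutive_alt (a : List Int) (b : List Int) (k : Int) : Bool :=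
  let m := k - 2
  if m ≤ 0 then true
  else
    let n : Int := a.length
    let ad := a ++ a
    let bd := b ++ b
    let xs := PySem.List.sorted ((PySem.List.pyRange 0 n 1).map
                (fun i => PySem.List.slice ad (some i) (some (i + m)))) (fun x => x) false
    let ys := PySem.List.sorted ((PySem.List.pyRange 0 n 1).map
                (fun i => PySem.List.slice bd (some i) (some (i + m)))) (fun x => x) false
    pvMergeHas xs ys

-- ===== PRECONDITION & SPEC =====
def Spec_shared_k_minus_2_consecutive (a : List Int) (b : List Int) (k : Int) (out : Bool) : Prop := out = shared_k_minus_2_consecutive_alt a b k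
instance (a : List Int) (b : List Int) (k : Int) (out : Bool) : Decidable (Spec_shared_k_minus_2_consecutive a b k out) := by unfold Spec_shared_k_minus_2_consecutive; infer_instance

-- ===== CLAIM (what is proved, stated in full; the proofs are below) =====
def Claim_equal_shared_k_minus_2_consecutive : Prop := ∀ (a : List Int) (b : List Int) (k : Int), Dom_shared_k_minus_2_consecutive a b k → Spec_shared_k_minus_2_consecutive a b k (shared_k_minus_2_consecutive a b k)

-- ===== LEMMAS AND PROOFS =====

-- the paired fold of A builds exactly the two sets of the mapped block lists
theorem pvFold_pair (l : List Int) (fa fb : Int → List Int)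
    (s t : PySem.Set (List Int)) :
    l.foldl (fun (st : PySem.Set (List Int) × PySem.Set (List Int)) i =>
        (PySem.Set.add st.1 (fa i), PySem.Set.add st.2 (fb i))) (s, t)
      = (PySem.Set.update s (l.map fa), PySem.Set.update t (l.map fb)) := by
  induction l generalizing s t with
  | nil => simp [PySem.Set.update]
  | cons x l ih =>
    simpa [PySem.Set.update, List.foldl_cons] using
      ih (PySem.Set.add s (fa x)) (PySem.Set.add t (fb x))

theorem pvSortedPairwise (xs : List (List Int)) :
    (PySem.List.sorted xs (fun x => x) false).Pairwise (fun a b => a ≤ b) := by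
  have h := PySem.List.sorted_pairwise (κ := List Int) xs (fun x => x)
  convert h using 2

-- merge over two ≤-sorted lists finds a common element iff one exists
theorem pvMergeHas_iff (xs ys : List (List Int))
    (hx : xs.Pairwise (fun a b => a ≤ b)) (hy : ys.Pairwise (fun a b => a ≤ b)) :
    pvMergeHas xs ys = true ↔ ∃ v, v ∈ xs ∧ v ∈ ys := by
  induction xs generalizing ys with
  | nil => simp [pvMergeHas]
  | cons x xs ihx =>
    induction ys with
    | nil => simp [pvMergeHas]
    | cons y ys ihy =>
      rcases List.pairwise_cons.1 hx with ⟨hxle, hx'⟩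
      rcases List.pairwise_cons.1 hy with ⟨hyle, hy'⟩
      rw [pvMergeHas]
      by_cases hxy : x = y
      · rw [if_pos hxy]
        exact ⟨fun _ => ⟨y, by simp [hxy], by simp⟩, fun _ => rfl⟩
      · rw [if_neg hxy]
        by_cases hlt : x < y
        · rw [if_pos hlt, ihx (y :: ys) hx' hy]
          constructor
          · rintro ⟨v, hv1, hv2⟩; exact ⟨v, List.mem_cons_of_mem _ hv1, hv2⟩
          · rintro ⟨v, hv1, hv2⟩
            rcases List.mem_cons.1 hv1 with rfl | hv1
            · rcases List.mem_cons.1 hv2 with heq | hv2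
              · exact absurd heq hxy
              · exact absurd (hyle _ hv2) (not_le.2 hlt)
            · exact ⟨v, hv1, hv2⟩
        · rw [if_neg hlt, ihy hy']
          have hylt : y < x := lt_of_le_of_ne (not_lt.1 hlt) (fun h => hxy h.symm)
          constructor
          · rintro ⟨v, hv1, hv2⟩; exact ⟨v, hv1, List.mem_cons_of_mem _ hv2⟩
          · rintro ⟨v, hv1, hv2⟩
            rcases List.mem_cons.1 hv2 with rfl | hv2
            · rcases List.mem_cons.1 hv1 with heq | hv1
              · exact absurd heq.symm hxy
              · exact absurd (hxle _ hv1) (not_le.2 hylt)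
            · exact ⟨v, hv1, hv2⟩

-- both programs decide "some circular (k-2)-block of a equals one of b"
theorem pv_both (a b : List Int) (k : Int) (hk : ¬ k - 2 ≤ 0) :
    shared_k_minus_2_consecutive a b k = shared_k_minus_2_consecutive_alt a b k := by
  unfold shared_k_minus_2_consecutive shared_k_minus_2_consecutive_alt
  simp only [if_neg hk]
  set n : Int := (a.length : Int)
  set fa : Int → List Int := fun i => PySem.List.slice (a ++ a) (some i) (some (i + (k - 2)))
  set fb : Int → List Int := fun i => PySem.List.slice (b ++ b) (some i) (some (i + (k - 2)))
  set l := PySem.List.pyRange 0 n 1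
  rw [pvFold_pair l fa fb]
  have hA : (!(PySem.Set.isdisjoint (PySem.Set.update PySem.Set.empty (l.map fa))
      (PySem.Set.update PySem.Set.empty (l.map fb)))) = true
      ↔ ∃ v, v ∈ l.map fa ∧ v ∈ l.map fb := by
    have h1 : PySem.Set.update PySem.Set.empty (l.map fa) = PySem.Set.ofList (l.map fa) := rfl
    have h2 : PySem.Set.update PySem.Set.empty (l.map fb) = PySem.Set.ofList (l.map fb) := rfl
    rw [h1, h2, Bool.not_eq_true', ← Bool.not_eq_true, PySem.Set.isdisjoint_iff]
    constructor
    · intro h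
      by_contra hno
      apply h
      intro v hv1 hv2
      exact hno ⟨v, (PySem.Set.mem_ofList (l.map fa) v).1 hv1,
        (PySem.Set.mem_ofList (l.map fb) v).1 hv2⟩
    · rintro ⟨v, hv1, hv2⟩ hall
      exact hall v ((PySem.Set.mem_ofList (l.map fa) v).2 hv1)
        ((PySem.Set.mem_ofList (l.map fb) v).2 hv2)
  have hB : pvMergeHas (PySem.List.sorted (l.map fa) (fun x => x) false)
      (PySem.List.sorted (l.map fb) (fun x => x) false) = true
      ↔ ∃ v, v ∈ l.map fa ∧ v ∈ l.map fb := by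
    refine (pvMergeHas_iff _ _ ?_ ?_).trans ?_
    · exact pvSortedPairwise (l.map fa)
    · exact pvSortedPairwise (l.map fb)
    · simp only [PySem.List.mem_sorted]
  exact Bool.eq_iff_iff.mpr (hA.trans hB.symm)

-- ===== VERDICT (by name: the statement is the Claim_ definition above) =====
theorem shared_k_minus_2_consecutive_spec : Claim_equal_shared_k_minus_2_consecutive := by
  intro a b k _
  unfold Spec_shared_k_minus_2_consecutive
  by_cases hk : k - 2 ≤ 0
  · unfold shared_k_minus_2_consecutive shared_k_minus_2_consecutive_alt
    simp [hk]
  · exact pv_both a b k hk
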